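-- pv_equiv track=rewrite | github.com/cSquaerd/ccDiceSumming | ccDiceSumming.py | diceLabel
-- ===== SOURCE A (Python) =====
-- def diceLabel(dice : list) -> str:
-- 	s = ""
-- 	S = set()
-- 	for d in sorted(set(dice), reverse = True):
-- 		s += str(dice.count(d)) + 'd' + str(d)
-- 		S.add(d)
-- 		if len(set(dice) - S) >= 1:
-- 			s += " + "
-- 	return s
-- ===== SOURCE B (Python) =====
-- def diceLabel(dice : list) -> str:
-- 	parts = []
-- 	for v in sorted(dice, reverse = True):
-- 		if parts and parts[-1][1] == v:
-- 			parts[-1] = (parts[-1][0] + 1, v)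
-- 		else:
-- 			parts.append((1, v))
-- 	return " + ".join(str(c) + 'd' + str(v) for c, v in parts)
-- ===== Notes on version B (the rewrite author's own statement) =====
-- stated objective: faster
-- what changed: Replaces A's loop over distinct values with per-value dice.count() scans and set-difference separator bookkeeping by a single descending sort followed by one run-grouping pass whose formatted runs are joined with ' + '.
import Mathlib
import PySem

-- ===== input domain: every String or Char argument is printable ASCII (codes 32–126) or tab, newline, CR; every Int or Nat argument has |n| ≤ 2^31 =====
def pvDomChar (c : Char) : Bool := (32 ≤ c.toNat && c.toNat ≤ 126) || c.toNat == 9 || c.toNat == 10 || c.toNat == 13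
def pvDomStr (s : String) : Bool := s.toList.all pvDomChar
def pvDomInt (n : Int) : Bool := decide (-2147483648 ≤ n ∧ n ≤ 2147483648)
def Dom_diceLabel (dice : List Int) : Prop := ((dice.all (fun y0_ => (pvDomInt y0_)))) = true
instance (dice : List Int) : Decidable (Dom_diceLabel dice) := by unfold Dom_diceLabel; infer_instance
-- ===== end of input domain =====

-- B replaces A's per-value dice.count scans and set-difference separator bookkeeping by one
-- descending sort followed by a single run-grouping pass joined with " + " (objective: faster).

-- ===== PORT A =====
-- literal port of A's loop body: s += str(dice.count(d)) + 'd' + str(d); S.add(d); if len(set(dice) - S) >= 1: s += " + "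
def pvStepA (dice : List Int) (st : List Char × PySem.Set Int) (d : Int) : List Char × PySem.Set Int :=
  let s := st.1 ++ (PySem.Int.toStr ((dice.count d : Int))).toList ++ "d".toList
            ++ (PySem.Int.toStr d).toList
  let S := PySem.Set.add st.2 d
  let s := if 1 ≤ PySem.Set.len (PySem.Set.diff (PySem.Set.ofList dice) S) then s ++ " + ".toList else s
  (s, S)

-- for d in sorted(set(dice), reverse=True): … ; return s
def diceLabel (dice : List Int) : String :=
  String.ofList (((PySem.List.sorted (PySem.Set.ofList dice) (fun x => x) true).foldl
    (pvStepA dice) ([], PySem.Set.empty)).1)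

-- ===== PORT B =====
-- literal port of B: sort descending once, group consecutive equal values into (count, value)
-- runs (the parts[-1] update becomes dropLast ++ [..]), then join the formatted runs with " + "
def diceLabel_alt (dice : List Int) : String :=
  let parts := (PySem.List.sorted dice (fun x => x) true).foldl
    (fun (parts : List (Int × Int)) v =>
      match parts.getLast? with
      | some last => if last.2 = v then parts.dropLast ++ [(last.1 + 1, v)] else parts ++ [(1, v)]
      | none => parts ++ [(1, v)])
    []
  String.ofList (PySem.Chars.join " + ".toList
    (parts.map (fun p => (PySem.Int.toStr p.1).toList ++ "d".toList ++ (PySem.Int.toStr p.2).toList)))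

-- ===== PRECONDITION & SPEC =====
def Spec_diceLabel (dice : List Int) (out : String) : Prop := out = diceLabel_alt dice
instance (dice : List Int) (out : String) : Decidable (Spec_diceLabel dice out) := by unfold Spec_diceLabel; infer_instance

-- ===== CLAIM (what is proved, stated in full; the proofs are below) =====
def Claim_equal_diceLabel : Prop := ∀ (dice : List Int), Dom_diceLabel dice → Spec_diceLabel dice (diceLabel dice)

-- ===== LEMMAS AND PROOFS =====

-- the formatted piece "{count}d{value}" for a value d of dice
def pvPiece (dice : List Int) (d : Int) : List Char :=
  (PySem.Int.toStr ((dice.count d : Int))).toList ++ "d".toList ++ (PySem.Int.toStr d).toList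

-- distinct values of dice in descending order (what A iterates over)
def pvDD (dice : List Int) : List Int := PySem.List.sorted (PySem.Set.ofList dice) (fun x => x) true

theorem pvDD_mem (dice : List Int) (x : Int) : x ∈ pvDD dice ↔ x ∈ dice := by
  unfold pvDD
  rw [List.Perm.mem_iff (PySem.List.sorted_perm _ _ _), PySem.Set.mem_ofList]

theorem pvDD_nodup (dice : List Int) : (pvDD dice).Nodup := by
  unfold pvDD
  exact (List.Perm.nodup_iff (PySem.List.sorted_perm _ _ _)).mpr (PySem.Set.nodup_ofList _)

theorem pvDD_pairwise (dice : List Int) : (pvDD dice).Pairwise (fun a b => b < a) := by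
  have h1 := PySem.List.sorted_pairwise_rev (PySem.Set.ofList dice) (fun x : Int => x)
  have h2 := pvDD_nodup dice
  exact (List.Pairwise.and h1 h2).imp (fun h => lt_of_le_of_ne h.1 (Ne.symm h.2))

theorem loopA (dice : List Int) : ∀ (rest : List Int) (acc : List Char) (S : PySem.Set Int),
    rest.Nodup → (∀ x ∈ rest, x ∉ S) → (∀ x : Int, x ∈ S ∨ x ∈ rest ↔ x ∈ dice) →
    (rest.foldl (pvStepA dice) (acc, S)).1
      = acc ++ PySem.Chars.join " + ".toList (rest.map (pvPiece dice)) := by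
  intro rest
  induction rest with
  | nil => intro acc S _ _ _; simp [PySem.Chars.join_nil]
  | cons d t ih =>
    intro acc S hnd hdisj hinv
    have hmem : ∀ x : Int,
        x ∈ PySem.Set.diff (PySem.Set.ofList dice) (PySem.Set.add S d) ↔ x ∈ t := by
      intro x
      rw [PySem.Set.mem_diff, PySem.Set.mem_ofList, PySem.Set.mem_add]
      constructor
      · rintro ⟨hx, hnot⟩
        rcases (hinv x).mpr hx with h | h
        · exact absurd (Or.inl h) hnot
        · rcases List.mem_cons.mp h with rfl | h
          · exact absurd (Or.inr rfl) hnot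
          · exact h
      · intro hx
        refine ⟨(hinv x).mp (Or.inr (List.mem_cons_of_mem _ hx)), ?_⟩
        rintro (h | rfl)
        · exact hdisj x (List.mem_cons_of_mem _ hx) h
        · exact (List.nodup_cons.mp hnd).1 hx
    have hcond : (1 ≤ PySem.Set.len (PySem.Set.diff (PySem.Set.ofList dice) (PySem.Set.add S d)))
        ↔ t ≠ [] := by
      simp only [PySem.Set.len]
      constructor
      · intro h ht
        subst ht
        have hz := List.eq_nil_iff_forall_not_mem.mpr
          (fun x hx => (List.not_mem_nil (a := x)) ((hmem x).mp hx))
        rw [hz] at h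
        simp at h
      · intro ht
        obtain ⟨x, hx⟩ := List.exists_mem_of_ne_nil _ ht
        have hlen := List.length_pos_of_mem ((hmem x).mpr hx)
        omega
    rw [List.foldl_cons]
    by_cases ht : t = []
    · subst ht
      have : pvStepA dice (acc, S) d
          = (acc ++ pvPiece dice d, PySem.Set.add S d) := by
        simp only [pvStepA, pvPiece]
        rw [if_neg (by rw [hcond]; simp)]
        simp [List.append_assoc]
      rw [this]
      simp [PySem.Chars.join_singleton, pvPiece]
    · have hstep : pvStepA dice (acc, S) d
          = (acc ++ pvPiece dice d ++ " + ".toList, PySem.Set.add S d) := by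
        simp only [pvStepA, pvPiece]
        rw [if_pos (hcond.mpr ht)]
        simp [List.append_assoc]
      rw [hstep]
      rw [ih (acc ++ pvPiece dice d ++ " + ".toList) (PySem.Set.add S d)
        (List.nodup_cons.mp hnd).2
        (by
          intro x hx hxS
          rcases (PySem.Set.mem_add _ _ _).mp hxS with h | rfl
          · exact hdisj x (List.mem_cons_of_mem _ hx) h
          · exact (List.nodup_cons.mp hnd).1 hx)
        (by
          intro x
          rw [PySem.Set.mem_add]
          constructor
          · rintro (⟨h | rfl⟩ | h)
            · exact (hinv x).mp (Or.inl h)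
            · exact (hinv x).mp (Or.inr (List.mem_cons_self))
            · exact (hinv x).mp (Or.inr (List.mem_cons_of_mem _ h))
          · intro hx
            rcases (hinv x).mpr hx with h | h
            · exact Or.inl (Or.inl h)
            · rcases List.mem_cons.mp h with rfl | h
              · exact Or.inl (Or.inr rfl)
              · exact Or.inr h)]
      obtain ⟨q, t', rfl⟩ : ∃ q t', t = q :: t' := by
        cases t with
        | nil => exact absurd rfl ht
        | cons q t' => exact ⟨q, t', rfl⟩
      simp only [List.map_cons, PySem.Chars.join_cons_cons]
      simp [List.append_assoc]

theorem partA (dice : List Int) :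
    diceLabel dice = String.ofList (PySem.Chars.join " + ".toList ((pvDD dice).map (pvPiece dice))) := by
  unfold diceLabel
  rw [loopA dice (PySem.List.sorted (PySem.Set.ofList dice) (fun x => x) true) [] PySem.Set.empty
    (pvDD_nodup dice)
    (by intro x _ hx; simp [PySem.Set.empty] at hx)
    (by
      intro x
      have h := pvDD_mem dice x
      unfold pvDD at h
      simp [PySem.Set.empty, h])]
  rfl

-- B-side
def pvStepB (parts : List (Int × Int)) (v : Int) : List (Int × Int) :=
  match parts.getLast? with
  | some last => if last.2 = v then parts.dropLast ++ [(last.1 + 1, v)] else parts ++ [(1, v)]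
  | none => parts ++ [(1, v)]

theorem count_flat (dice : List Int) : ∀ (l : List Int), l.Nodup → ∀ v : Int,
    (l.flatMap (fun d => List.replicate (dice.count d) d)).count v
      = if v ∈ l then dice.count v else 0 := by
  intro l
  induction l with
  | nil => intro _ v; simp
  | cons d t ih =>
    intro hnd v
    rw [List.flatMap_cons, List.count_append, List.count_replicate,
      ih (List.nodup_cons.mp hnd).2 v]
    by_cases hvd : v = d
    · subst hvd
      have : v ∉ t := (List.nodup_cons.mp hnd).1
      simp [this]
    · simp [hvd, Ne.symm hvd, List.mem_cons]

theorem pairwise_flat (dice : List Int) : ∀ (l : List Int), l.Pairwise (fun a b => b < a) →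
    (l.flatMap (fun d => List.replicate (dice.count d) d)).Pairwise (fun a b : Int => b ≤ a) := by
  intro l
  induction l with
  | nil => intro _; simp
  | cons d t ih =>
    intro hp
    rw [List.flatMap_cons]
    rw [List.pairwise_append]
    refine ⟨?_, ih (List.pairwise_cons.mp hp).2, ?_⟩
    · rw [List.pairwise_replicate]
      right; exact le_refl d
    · intro a ha b hb
      have ha' := List.eq_of_mem_replicate ha
      obtain ⟨e, he, hbe⟩ := List.mem_flatMap.mp hb
      have hb' := List.eq_of_mem_replicate hbe
      subst ha' hb'
      exact le_of_lt ((List.pairwise_cons.mp hp).1 _ he)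

theorem sortfull_eq (dice : List Int) :
    PySem.List.sorted dice (fun x => x) true
      = (pvDD dice).flatMap (fun d => List.replicate (dice.count d) d) := by
  apply PySem.List.eq_of_perm_of_pairwise_le_of_injective (fun x : Int => -x) neg_injective
  · -- Perm
    refine (PySem.List.sorted_perm dice (fun x => x) true).trans (List.perm_iff_count.mpr ?_)
    intro v
    rw [count_flat dice (pvDD dice) (pvDD_nodup dice) v]
    by_cases hv : v ∈ dice
    · rw [if_pos ((pvDD_mem dice v).mpr hv)]
    · rw [if_neg (fun h => hv ((pvDD_mem dice v).mp h))]
      exact List.count_eq_zero.mpr hv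
  · exact (PySem.List.sorted_pairwise_rev dice (fun x : Int => x)).imp (fun h => neg_le_neg h)
  · exact (pairwise_flat dice (pvDD dice) (pvDD_pairwise dice)).imp (fun h => neg_le_neg h)

theorem loopB_run (v : Int) (k : Nat) : ∀ (parts : List (Int × Int)) (c : Int),
    (List.replicate k v).foldl pvStepB (parts ++ [(c, v)]) = parts ++ [(c + k, v)] := by
  induction k with
  | zero => intro parts c; simp
  | succ k ih =>
    intro parts c
    rw [List.replicate_succ, List.foldl_cons]
    have : pvStepB (parts ++ [(c, v)]) v = parts ++ [(c + 1, v)] := by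
      simp [pvStepB]
    rw [this, ih parts (c + 1)]
    have : c + 1 + (k : Int) = c + ((k : Nat) + 1 : Nat) := by push_cast; ring
    rw [this]

theorem loopB_start (v : Int) (k : Nat) (hk : 0 < k) (parts : List (Int × Int))
    (h : ∀ p, parts.getLast? = some p → p.2 ≠ v) :
    (List.replicate k v).foldl pvStepB parts = parts ++ [((k : Int), v)] := by
  obtain ⟨k', rfl⟩ : ∃ k', k = k' + 1 := ⟨k - 1, by omega⟩
  rw [List.replicate_succ, List.foldl_cons]
  have hfirst : pvStepB parts v = parts ++ [(1, v)] := by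
    unfold pvStepB
    cases hl : parts.getLast? with
    | none => simp
    | some p => simp [h p hl]
  rw [hfirst, loopB_run v k' parts 1]
  have : (1 : Int) + k' = ((k' + 1 : Nat) : Int) := by push_cast; ring
  rw [this]

theorem loopB_all (dice : List Int) : ∀ (l : List Int) (parts : List (Int × Int)),
    l.Nodup → (∀ d ∈ l, 0 < dice.count d) →
    (∀ p, parts.getLast? = some p → p.2 ∉ l) →
    (l.flatMap (fun d => List.replicate (dice.count d) d)).foldl pvStepB parts
      = parts ++ l.map (fun d => ((dice.count d : Int), d)) := by
  intro l
  induction l with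
  | nil => intro parts _ _ _; simp
  | cons d t ih =>
    intro parts hnd hpos hlast
    rw [List.flatMap_cons, List.foldl_append]
    rw [loopB_start d (dice.count d) (hpos d List.mem_cons_self) parts
      (fun p hp => fun hpv => hlast p hp (hpv ▸ List.mem_cons_self))]
    rw [ih (parts ++ [((dice.count d : Int), d)])
      (List.nodup_cons.mp hnd).2
      (fun e he => hpos e (List.mem_cons_of_mem _ he))
      (by
        intro p hp
        rw [List.getLast?_concat] at hp
        obtain rfl := Option.some.inj hp
        exact (List.nodup_cons.mp hnd).1)]
    simp [List.append_assoc]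

theorem partB (dice : List Int) :
    diceLabel_alt dice = String.ofList (PySem.Chars.join " + ".toList ((pvDD dice).map (pvPiece dice))) := by
  unfold diceLabel_alt
  have hfold : (PySem.List.sorted dice (fun x => x) true).foldl
      (fun (parts : List (Int × Int)) v =>
        match parts.getLast? with
        | some last => if last.2 = v then parts.dropLast ++ [(last.1 + 1, v)] else parts ++ [(1, v)]
        | none => parts ++ [(1, v)]) []
      = (pvDD dice).map (fun d => ((dice.count d : Int), d)) := by
    show (PySem.List.sorted dice (fun x => x) true).foldl pvStepB [] = _
    rw [sortfull_eq dice]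
    rw [loopB_all dice (pvDD dice) [] (pvDD_nodup dice)
      (fun d hd => List.count_pos_iff.mpr ((pvDD_mem dice d).mp hd))
      (by intro p hp; simp at hp)]
    simp
  rw [hfold]
  show String.ofList (PySem.Chars.join " + ".toList
    (((pvDD dice).map (fun d => ((dice.count d : Int), d))).map
      (fun p => (PySem.Int.toStr p.1).toList ++ "d".toList ++ (PySem.Int.toStr p.2).toList))) = _
  rw [List.map_map]
  rfl

-- ===== VERDICT (by name: the statement is the Claim_ definition above) =====
theorem diceLabel_spec : Claim_equal_diceLabel := by
  intro dice _
  unfold Spec_diceLabel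
  rw [partA, partB]
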